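-- pv_equiv track=rewrite | github.com/sp9028/P1 | Predavanja 12 Specops/Specops.py | razporedi
-- ===== SOURCE A (Python) =====
-- def koraki(x, y, pot):
--     seznam = []
--     seznam.append((x,y))
--     for i in pot:
--         if i == '>':
--             x += 1
--             seznam.append((x, y))
--         elif i == '^':
--             y -= 1
--             seznam.append((x, y))
--         elif i == 'v':
--             y += 1
--             seznam.append((x, y))
--         elif i == '<':
--             x -= 1
--             seznam.append((x, y))
--     return seznam
--
-- def dopolnjeno(s, n):
--     nov = s.copy()
--     i = 0
--     if len(s) <= n:
--         while i < (n - len(s)):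
--             nov.append(s[-1])
--             i += 1
--
--     return nov
--
-- def razporedi(specialci, marsovci):
--
--     seznam_s = []
--     seznam_m = []
--     maxi = []
--
--     for s in specialci:
--         x,y,pot = s
--         seznam_s.append(koraki(x,y,pot))
--
--     for m in marsovci:
--         x,y,pot = m
--         seznam_m.append(koraki(x,y,pot))
--
--     for i in range(len(seznam_s)):
--         maxi.append(len(seznam_s[i]))
--
--     for k in range(len(seznam_m)):
--         maxi.append(len(seznam_m[k]))
--
--     vsi_s = []
--     for s in range(len(seznam_s)):
--         if len(seznam_s[s]) != max(maxi):
--             vsi_s.append(dopolnjeno(seznam_s[s],max(maxi)))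
--         else:
--             vsi_s.append(seznam_s[s])
--
--     vsi_m = []
--     for m in range(len(seznam_m)):
--         if len(seznam_m[m]) != max(maxi):
--             vsi_m.append(dopolnjeno(seznam_m[m],max(maxi)))
--         else:
--             vsi_m.append(seznam_m[m])
--
--     koncni_s = []
--     if vsi_s == []:
--         koncni_s = []
--     else:
--         i = 0
--         for j in range(len(vsi_s[i])):
--             vrsta = []
--             for i in range(len(vsi_s)):
--                 vrsta.append(vsi_s[i][j])
--             koncni_s.append(vrsta)
--
--     koncni_m = []
--     if vsi_m == []:
--         koncni_m = []
--     else: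
--         i = 0
--         for j in range(len(vsi_m[i])):
--             vrsta = []
--             for i in range(len(vsi_m)):
--                 vrsta.append(vsi_m[i][j])
--             koncni_m.append(vrsta)
--
--     return (koncni_s,koncni_m)
-- ===== SOURCE B (Python) =====
-- def razporedi(specialci, marsovci):
--     def pot_do(x, y, pot):
--         # recursive path builder: always starts at (x, y)
--         if not pot:
--             return [(x, y)]
--         c = pot[0]
--         if c == '>':
--             return [(x, y)] + pot_do(x + 1, y, pot[1:])
--         if c == '^':
--             return [(x, y)] + pot_do(x, y - 1, pot[1:])
--         if c == 'v':
--             return [(x, y)] + pot_do(x, y + 1, pot[1:])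
--         if c == '<':
--             return [(x, y)] + pot_do(x - 1, y, pot[1:])
--         return pot_do(x, y, pot[1:])
--
--     ps = [pot_do(x, y, pot) for (x, y, pot) in specialci]
--     pm = [pot_do(x, y, pot) for (x, y, pot) in marsovci]
--     if not ps and not pm:
--         return ([], [])
--     maxlen = max(len(p) for p in ps + pm)
--
--     def transponiraj(group):
--         # fuse padding and transpose: clamped indexing repeats the last position
--         if not group:
--             return []
--         return [[p[min(j, len(p) - 1)] for p in group] for j in range(maxlen)]
--
--     return (transponiraj(ps), transponiraj(pm))
-- ===== Notes on version B (the rewrite author's own statement) =====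
-- stated objective: simpler
-- what changed: B builds paths by structural recursion and fuses padding and transposition into one clamped-index transpose over the global max length, removing the maxi list, dopolnjeno and the padded copies.
import Mathlib
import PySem

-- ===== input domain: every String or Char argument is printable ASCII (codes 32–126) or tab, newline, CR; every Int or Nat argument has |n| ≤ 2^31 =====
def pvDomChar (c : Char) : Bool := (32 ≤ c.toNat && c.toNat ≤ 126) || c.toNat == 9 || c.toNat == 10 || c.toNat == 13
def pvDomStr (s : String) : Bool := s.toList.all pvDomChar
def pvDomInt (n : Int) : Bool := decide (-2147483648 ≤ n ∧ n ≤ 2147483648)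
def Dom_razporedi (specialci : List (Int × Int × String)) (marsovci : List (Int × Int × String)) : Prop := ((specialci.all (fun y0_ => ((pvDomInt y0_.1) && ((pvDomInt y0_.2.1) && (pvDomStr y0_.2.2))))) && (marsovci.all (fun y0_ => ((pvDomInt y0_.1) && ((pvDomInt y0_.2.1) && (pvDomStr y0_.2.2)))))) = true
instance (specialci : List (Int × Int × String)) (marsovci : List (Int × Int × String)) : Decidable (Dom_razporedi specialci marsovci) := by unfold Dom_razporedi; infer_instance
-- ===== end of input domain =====

-- B fuses padding and transposition into one clamped-index transpose (objective: simpler).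

-- ===== PORT A =====
-- koraki's for-loop: state is the current (x, y) plus the accumulated seznam.
def korakiAux : Int → Int → List Char → List (Int × Int) → List (Int × Int)
  | _, _, [], acc => acc
  | x, y, c :: rest, acc =>
    if c = '>' then korakiAux (x + 1) y rest (acc ++ [(x + 1, y)])
    else if c = '^' then korakiAux x (y - 1) rest (acc ++ [(x, y - 1)])
    else if c = 'v' then korakiAux x (y + 1) rest (acc ++ [(x, y + 1)])
    else if c = '<' then korakiAux (x - 1) y rest (acc ++ [(x - 1, y)])
    else korakiAux x y rest acc

def koraki (x y : Int) (pot : String) : List (Int × Int) := korakiAux x y pot.toList [(x, y)]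

-- Python's s[-1] is s[len(s)-1]; A only calls this with nonempty s, so getD is exact.
def dopolnjeno (s : List (Int × Int)) (n : Nat) : List (Int × Int) :=
  if s.length ≤ n then s ++ List.replicate (n - s.length) (s.getD (s.length - 1) (0, 0)) else s

-- the per-element body of A's two 'vsi' loops (max(maxi) is loop-invariant)
def padStep (mx : Nat) (s : List (Int × Int)) : List (Int × Int) :=
  if s.length ≠ mx then dopolnjeno s mx else s

-- A's transpose loops: range over len(vsi[0]); every index access is in range, so getD is exact.
def transA (vsi : List (List (Int × Int))) : List (List (Int × Int)) :=
  if vsi = [] then []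
  else (List.range (vsi.headD []).length).map (fun j => vsi.map (fun p => p.getD j (0, 0)))

def razporedi (specialci : List (Int × Int × String)) (marsovci : List (Int × Int × String)) : (List (List (Int × Int))) × (List (List (Int × Int))) :=
  let seznam_s := specialci.map (fun s => koraki s.1 s.2.1 s.2.2)
  let seznam_m := marsovci.map (fun m => koraki m.1 m.2.1 m.2.2)
  let maxi := seznam_s.map List.length ++ seznam_m.map List.length
  -- max(maxi): only evaluated when maxi is nonempty, where foldl max 0 is Python's max
  let mx := maxi.foldl max 0
  let vsi_s := seznam_s.map (padStep mx)
  let vsi_m := seznam_m.map (padStep mx)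
  (transA vsi_s, transA vsi_m)

-- ===== PORT B =====
-- Source B's recursive pot_do
def potDo (x y : Int) : List Char → List (Int × Int)
  | [] => [(x, y)]
  | c :: rest =>
    if c = '>' then (x, y) :: potDo (x + 1) y rest
    else if c = '^' then (x, y) :: potDo x (y - 1) rest
    else if c = 'v' then (x, y) :: potDo x (y + 1) rest
    else if c = '<' then (x, y) :: potDo (x - 1) y rest
    else potDo x y rest

-- Source B's transponiraj: clamped index is always in range (group paths are nonempty), getD exact
def transB (maxlen : Nat) (group : List (List (Int × Int))) : List (List (Int × Int)) :=
  if group = [] then []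
  else (List.range maxlen).map (fun j => group.map (fun p => p.getD (min j (p.length - 1)) (0, 0)))

def razporedi_alt (specialci : List (Int × Int × String)) (marsovci : List (Int × Int × String)) : (List (List (Int × Int))) × (List (List (Int × Int))) :=
  let ps := specialci.map (fun s => potDo s.1 s.2.1 s.2.2.toList)
  let pm := marsovci.map (fun m => potDo m.1 m.2.1 m.2.2.toList)
  if ps ++ pm = [] then ([], [])
  else
    -- max over a nonempty list of Nats: foldl max 0 is Python's max
    let maxlen := ((ps ++ pm).map List.length).foldl max 0
    (transB maxlen ps, transB maxlen pm)

-- ===== PRECONDITION & SPEC =====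
def Spec_razporedi (specialci : List (Int × Int × String)) (marsovci : List (Int × Int × String)) (out : (List (List (Int × Int))) × (List (List (Int × Int)))) : Prop := out = razporedi_alt specialci marsovci
instance (specialci : List (Int × Int × String)) (marsovci : List (Int × Int × String)) (out : (List (List (Int × Int))) × (List (List (Int × Int)))) : Decidable (Spec_razporedi specialci marsovci out) := by unfold Spec_razporedi; infer_instance

-- ===== CLAIM (what is proved, stated in full; the proofs are below) =====
def Claim_equal_razporedi : Prop := ∀ (specialci : List (Int × Int × String)) (marsovci : List (Int × Int × String)), Dom_razporedi specialci marsovci → Spec_razporedi specialci marsovci (razporedi specialci marsovci)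

-- ===== LEMMAS AND PROOFS =====

/-- `potDo` always starts at the start point. -/
theorem potDo_head (l : List Char) (x y : Int) :
    potDo x y l = (x, y) :: (potDo x y l).tail := by
  induction l generalizing x y with
  | nil => rfl
  | cons c rest ih =>
    simp only [potDo]
    split_ifs with h1 h2 h3 h4
    · simp
    · simp
    · simp
    · simp
    · exact ih x y

/-- The accumulator invariant tying A's loop to B's recursion. -/
theorem korakiAux_eq (l : List Char) (x y : Int) (acc : List (Int × Int)) :
    korakiAux x y l acc = acc ++ (potDo x y l).tail := by
  induction l generalizing x y acc with
  | nil => simp [korakiAux, potDo]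
  | cons c rest ih =>
    simp only [korakiAux, potDo]
    split_ifs with h1 h2 h3 h4
    · rw [ih, List.tail_cons]; conv_rhs => rw [potDo_head rest]
      simp
    · rw [ih, List.tail_cons]; conv_rhs => rw [potDo_head rest]
      simp
    · rw [ih, List.tail_cons]; conv_rhs => rw [potDo_head rest]
      simp
    · rw [ih, List.tail_cons]; conv_rhs => rw [potDo_head rest]
      simp
    · exact ih x y acc

theorem koraki_eq (x y : Int) (pot : String) :
    koraki x y pot = potDo x y pot.toList := by
  rw [koraki, korakiAux_eq]
  conv_rhs => rw [potDo_head pot.toList]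
  rfl

theorem le_foldl_max (l : List Nat) (b a : Nat) (h : a ∈ l ∨ a ≤ b) :
    a ≤ l.foldl max b := by
  induction l generalizing b with
  | nil =>
    simp only [List.foldl_nil]
    rcases h with h | h
    · simp at h
    · exact h
  | cons c rest ih =>
    simp only [List.foldl_cons]
    apply ih
    rcases h with h | h
    · rcases List.mem_cons.mp h with rfl | h
      · exact Or.inr (Nat.le_max_right _ _)
      · exact Or.inl h
    · exact Or.inr (le_trans h (Nat.le_max_left _ _))

theorem padStep_length (mx : Nat) (p : List (Int × Int)) (hle : p.length ≤ mx) :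
    (padStep mx p).length = mx := by
  by_cases h : p.length = mx
  · simp [padStep, h]
  · simp [padStep, dopolnjeno, h, hle]

theorem padStep_getD (mx : Nat) (p : List (Int × Int)) (j : Nat)
    (hle : p.length ≤ mx) (hj : j < mx) :
    (padStep mx p).getD j (0, 0) = p.getD (min j (p.length - 1)) (0, 0) := by
  unfold padStep dopolnjeno
  by_cases hjp : j < p.length
  · have hmin : min j (p.length - 1) = j := by omega
    rw [hmin]
    split_ifs with h1
    · exact List.getD_append _ _ _ _ hjp
    · rfl
  · have h1 : p.length ≠ mx := by omega
    have hmin : min j (p.length - 1) = p.length - 1 := by omega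
    rw [hmin, if_pos h1, if_pos hle,
      List.getD_append_right _ _ _ _ (by omega)]
    exact List.getD_replicate _ (by omega)

theorem transA_pad (mx : Nat) (G : List (List (Int × Int)))
    (hle : ∀ p ∈ G, p.length ≤ mx) :
    transA (G.map (padStep mx)) = transB mx G := by
  cases G with
  | nil => rfl
  | cons p0 rest =>
    have h0 : p0.length ≤ mx := hle p0 (by simp)
    have hne : List.map (padStep mx) (p0 :: rest) ≠ [] := by simp
    have hh : (List.map (padStep mx) (p0 :: rest)).headD [] = padStep mx p0 := by simp
    simp only [transA, transB, if_neg hne, if_neg (List.cons_ne_nil p0 rest), hh,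
      padStep_length mx p0 h0]
    apply List.map_congr_left
    intro j hj
    rw [List.mem_range] at hj
    rw [List.map_map]
    apply List.map_congr_left
    intro p hp
    simp only [Function.comp_apply]
    exact padStep_getD mx p j (hle p hp) hj

theorem razporedi_eq (specialci marsovci : List (Int × Int × String)) :
    razporedi specialci marsovci = razporedi_alt specialci marsovci := by
  unfold razporedi razporedi_alt
  simp only [koraki_eq]
  set ps := specialci.map (fun s => potDo s.1 s.2.1 s.2.2.toList) with hps
  set pm := marsovci.map (fun m => potDo m.1 m.2.1 m.2.2.toList) with hpm
  by_cases hnil : ps ++ pm = []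
  · obtain ⟨h1, h2⟩ := List.append_eq_nil_iff.mp hnil
    simp [h1, h2, transA]
  · rw [if_neg hnil, ← List.map_append]
    set mx := ((ps ++ pm).map List.length).foldl max 0 with hmx
    have hmem : ∀ p ∈ ps ++ pm, p.length ≤ mx := by
      intro p hp
      exact le_foldl_max _ _ _ (Or.inl (List.mem_map_of_mem hp))
    refine Prod.ext ?_ ?_ <;> simp only
    · exact transA_pad mx ps (fun p hp => hmem p (List.mem_append_left _ hp))
    · exact transA_pad mx pm (fun p hp => hmem p (List.mem_append_right _ hp))

-- ===== VERDICT (by name: the statement is the Claim_ definition above) =====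
theorem razporedi_spec : Claim_equal_razporedi := by
  intro specialci marsovci _
  unfold Spec_razporedi
  exact razporedi_eq specialci marsovci
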